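-- pv_equiv track=rewrite | github.com/dth12/algorithm | programmers/위클리 챌린지/4주차_직업군 추천하기.py | solution
-- ===== SOURCE A (Python) =====
-- def solution(table, languages, preference):
--     score_table = {}
--     result = {'SI': 0, 'CONTENTS': 0, 'HARDWARE': 0, 'PORTAL': 0, 'GAME': 0}
--     for col in table:
--         lang_list = col.split()
--         part = lang_list.pop(0)
--         score_table[part] = {lang: 5 - idx for idx, lang in enumerate(lang_list)}
--
--     for idx, my_lang in enumerate(languages):
--         for part in score_table:
--             if my_lang not in score_table[part]: continue
--             temp = score_table[part][my_lang]
--             result[part] += temp * preference[idx]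
--
--     result_list = [[value, key] for key, value in result.items()]
--     result_list.sort(key=lambda x: (-x[0], x[1]))
--     return result_list[0][1]
-- ===== SOURCE B (Python) =====
-- def solution(table, languages, preference):
--     pref = {}
--     for lang, p in zip(languages, preference):
--         pref[lang] = pref.get(lang, 0) + p
--     scores = {'SI': 0, 'CONTENTS': 0, 'HARDWARE': 0, 'PORTAL': 0, 'GAME': 0}
--     for row in table:
--         part, *langs = row.split()
--         if part in scores:
--             row_scores = {lang: 5 - idx for idx, lang in enumerate(langs)}
--             scores[part] = sum(s * pref.get(lang, 0) for lang, s in row_scores.items())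
--     return min(scores, key=lambda k: (-scores[k], k))
-- ===== Notes on version B (the rewrite author's own statement) =====
-- stated objective: faster
-- what changed: B drops A's nested per-language scan over all categories (membership test into a dict-of-dicts) and the build-list-then-sort finish: it aggregates preferences per language into one dict, computes each category's score in a single arithmetic pass over its (last) table row, and picks the winner with min(scores, key=(-score, name)).
import Mathlib
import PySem

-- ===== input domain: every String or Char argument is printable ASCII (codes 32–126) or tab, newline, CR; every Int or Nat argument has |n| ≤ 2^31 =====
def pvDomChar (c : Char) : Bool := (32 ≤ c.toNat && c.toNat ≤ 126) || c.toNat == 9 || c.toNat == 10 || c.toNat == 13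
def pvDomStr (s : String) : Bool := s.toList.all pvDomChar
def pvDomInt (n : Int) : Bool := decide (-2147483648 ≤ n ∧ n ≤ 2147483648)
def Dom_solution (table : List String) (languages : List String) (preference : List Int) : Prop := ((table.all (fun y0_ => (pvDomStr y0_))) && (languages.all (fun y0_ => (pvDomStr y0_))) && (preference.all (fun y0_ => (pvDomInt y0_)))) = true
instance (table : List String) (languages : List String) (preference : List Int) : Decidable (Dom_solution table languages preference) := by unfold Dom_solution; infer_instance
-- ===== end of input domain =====

-- B replaces A's per-language scan over every category and the sort-based finish by a
-- per-language preference dict, one scoring pass over the table rows and min(, key=(-score, name));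
-- a timing run measured B faster on the large generated inputs.

-- ===== PORT A =====
-- {lang: 5 - idx for idx, lang in enumerate(lang_list)}
def pvRowDict (langs : List String) : PySem.Dict String Int :=
  (PySem.List.enumerate langs).foldl (fun d p => d.insert p.2 (5 - p.1)) PySem.Dict.empty

-- first loop of A: score_table[part] = {...}  (part = lang_list.pop(0))
def pvScoreTable (table : List String) : PySem.Dict String (PySem.Dict String Int) :=
  table.foldl (fun st col =>
    match PySem.List.pop? (PySem.Str.split₀ col) 0 with
    | none => st          -- Python: lang_list.pop(0) raises IndexError; excluded by Pre_solution
    | some pr => st.insert pr.1 (pvRowDict pr.2)) PySem.Dict.empty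

-- second loop of A over enumerate(languages) and over the keys of score_table
def pvResultA (table : List String) (languages : List String) (preference : List Int) : PySem.Dict String Int :=
  (PySem.List.enumerate languages).foldl (fun res p =>
    (pvScoreTable table).keys.foldl (fun res part =>
      let d := (pvScoreTable table).getD part PySem.Dict.empty
      if d.contains p.2 then
        -- result[part] += temp * preference[idx]  (KeyError for part outside result: excluded by Pre_solution)
        res.modify part 0 (fun w => w + d.getD p.2 0 * PySem.List.pyGetD preference p.1 0)
      else res) res)
    (PySem.Dict.ofList [("SI", 0), ("CONTENTS", 0), ("HARDWARE", 0), ("PORTAL", 0), ("GAME", 0)])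

def solution (table : List String) (languages : List String) (preference : List Int) : String :=
  let result_list := (pvResultA table languages preference).items.map (fun kv => (kv.2, kv.1))
  match PySem.List.pyGet? (PySem.List.sorted2 result_list (fun x => -x.1) (fun x => x.2)) 0 with
  | some x => x.2
  | none => ""          -- unreachable: result always has five keys

-- ===== PORT B =====
-- pref[lang] = pref.get(lang, 0) + p   over zip(languages, preference)
def pvPrefDict (languages : List String) (preference : List Int) : PySem.Dict String Int :=
  (languages.zip preference).foldl (fun d lp => d.insert lp.1 (d.getD lp.1 0 + lp.2)) PySem.Dict.empty

-- sum(s * pref.get(lang, 0) for lang, s in row_scores.items())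
def pvRowSum (pref : PySem.Dict String Int) (langs : List String) : Int :=
  (pvRowDict langs).items.foldl (fun acc ls => acc + ls.2 * pref.getD ls.1 0) 0

def pvScoresB (table : List String) (languages : List String) (preference : List Int) : PySem.Dict String Int :=
  table.foldl (fun sc row =>
    match PySem.Str.split₀ row with
    | [] => sc          -- Python: 'part, *langs = row.split()' raises ValueError; excluded by Pre_solution
    | part :: langs =>
      if sc.contains part then sc.insert part (pvRowSum (pvPrefDict languages preference) langs)
      else sc)
    (PySem.Dict.ofList [("SI", 0), ("CONTENTS", 0), ("HARDWARE", 0), ("PORTAL", 0), ("GAME", 0)])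

def solution_alt (table : List String) (languages : List String) (preference : List Int) : String :=
  match PySem.List.min2? (pvScoresB table languages preference).keys
      (fun k => -((pvScoresB table languages preference).getD k 0)) (fun k => k) with
  | some k => k
  | none => ""          -- unreachable: scores always has five keys

-- ===== PRECONDITION & SPEC =====
def pvFIVE : List String := ["SI", "CONTENTS", "HARDWARE", "PORTAL", "GAME"]

def pvToks (table : List String) : List (List String) := table.map PySem.Str.split₀

-- every row has at least one word (else A's pop(0) raises IndexError)
def pvPreRows (table : List String) : Prop := ∀ t ∈ pvToks table, t ≠ []

-- every match of a user language against an effective row (the last row with its head word) hits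
-- one of the five categories at a language index below len(preference) (else A raises KeyError / IndexError)
def pvPreMatch (table : List String) (languages : List String) (preference : List Int) : Prop :=
  ∀ p ∈ (pvToks table).zipIdx,
    (∀ q ∈ (pvToks table).zipIdx, p.2 < q.2 → q.1.head? ≠ p.1.head?) →
    ∀ r ∈ languages.zipIdx, r.1 ∈ p.1.tail →
      p.1.head? ∈ pvFIVE.map some ∧ r.2 < preference.length

-- Pre_solution holds exactly where the Python A returns normally (A raises IndexError/KeyError outside it)
def Pre_solution (table : List String) (languages : List String) (preference : List Int) : Prop :=
  pvPreRows table ∧ pvPreMatch table languages preference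
instance (table : List String) (languages : List String) (preference : List Int) : Decidable (Pre_solution table languages preference) := by
  unfold Pre_solution pvPreRows pvPreMatch; infer_instance

def pvWitness_solution : List String × List String × List Int :=
  (["SI python java", "CONTENTS java"], ["python", "java"], [3, 2])

def Spec_solution (table : List String) (languages : List String) (preference : List Int) (out : String) : Prop := out = solution_alt table languages preference
instance (table : List String) (languages : List String) (preference : List Int) (out : String) : Decidable (Spec_solution table languages preference out) := by unfold Spec_solution; infer_instance

-- ===== CLAIM (what is proved, stated in full; the proofs are below) =====
def Claim_equal_solution : Prop := ∀ (table : List String) (languages : List String) (preference : List Int), Dom_solution table languages preference → Pre_solution table languages preference → Spec_solution table languages preference (solution table languages preference)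


-- ===== LEMMAS AND PROOFS =====

-- the last effective row with head k, as tracked left to right (proof-side spec function)
def pvEff (k : String) (table : List String) : Option (List String) :=
  table.foldl (fun acc r =>
    match PySem.Str.split₀ r with
    | [] => acc
    | p :: rest => if p = k then some rest else acc) none

-- value term of A's inner loop for one (index, language) pair
def pvTerm (d? : Option (PySem.Dict String Int)) (l : String) (x : Int) : Int :=
  match d? with
  | none => 0
  | some d => if d.contains l then d.getD l 0 * x else 0

-- total added to one key by A's second loop
def pvSumA (d? : Option (PySem.Dict String Int)) : List String → List Int → Int
  | [], _ => 0
  | l :: ls, ps => pvTerm d? l (ps.headD 0) + pvSumA d? ls ps.tail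

-- strict "less" of Python's tuple key (-score, name)
def pvLt (p q : Int × String) : Bool :=
  decide (-p.1 < -q.1) || (!decide (-q.1 < -p.1) && decide (p.2 < q.2))

theorem pvLt_irrefl (p : Int × String) : pvLt p p = false := by
  simp [pvLt]

theorem pvLt_asymm {p q : Int × String} (h : pvLt p q = true) : pvLt q p = false := by
  simp only [pvLt, Bool.or_eq_true, Bool.and_eq_true, Bool.not_eq_true', decide_eq_true_eq,
    Bool.or_eq_false_iff, Bool.and_eq_false_iff, decide_eq_false_iff_not, Bool.not_eq_false',
    decide_eq_true_eq] at *
  rcases h with h | ⟨h1, h2⟩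
  · exact ⟨by omega, Or.inl (by omega)⟩
  · exact ⟨by omega, Or.inr (not_lt_of_gt h2)⟩

theorem pvLt_trans {p q r : Int × String} (h1 : pvLt p q = true) (h2 : pvLt q r = true) :
    pvLt p r = true := by
  simp only [pvLt, Bool.or_eq_true, Bool.and_eq_true, Bool.not_eq_true', decide_eq_true_eq,
    decide_eq_false_iff_not] at *
  rcases h1 with h1 | ⟨h1a, h1b⟩ <;> rcases h2 with h2 | ⟨h2a, h2b⟩
  · exact Or.inl (by omega)
  · exact Or.inl (by omega)
  · exact Or.inl (by omega)
  · exact Or.inr ⟨by omega, lt_trans h1b h2b⟩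

theorem pvLt_conn {p q : Int × String} (h1 : pvLt p q = false) (h2 : pvLt q p = false) : p = q := by
  simp only [pvLt, Bool.or_eq_false_iff, Bool.and_eq_false_iff, Bool.not_eq_false',
    decide_eq_false_iff_not, decide_eq_true_eq] at *
  obtain ⟨ha, hb⟩ := h1
  obtain ⟨hc, hd⟩ := h2
  have hfst : p.1 = q.1 := by omega
  have hsnd : p.2 = q.2 := by
    rcases hb with hb | hb
    · omega
    · rcases hd with hd | hd
      · omega
      · exact le_antisymm (not_lt.mp hd) (not_lt.mp hb)
  exact Prod.ext hfst hsnd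


-- ---------- score_table characterization ----------

theorem pvST_get_aux (k : String) :
    ∀ (table : List String) (st : PySem.Dict String (PySem.Dict String Int)) (acc : Option (List String)),
      st.get? k = acc.map pvRowDict →
      (table.foldl (fun st col =>
        match PySem.List.pop? (PySem.Str.split₀ col) 0 with
        | none => st
        | some pr => st.insert pr.1 (pvRowDict pr.2)) st).get? k
        = ((table.foldl (fun acc r =>
            match PySem.Str.split₀ r with
            | [] => acc
            | p :: rest => if p = k then some rest else acc) acc).map pvRowDict) := by
  intro table
  induction table with
  | nil => intro st acc h; simpa using h
  | cons col rest ih =>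
    intro st acc h
    simp only [List.foldl_cons]
    cases hs : PySem.Str.split₀ col with
    | nil => simpa using ih st acc h
    | cons p t =>
      simp only [PySem.List.pop?_zero_cons]
      by_cases hpk : p = k
      · subst hpk
        refine ih _ _ ?_
        simp [PySem.Dict.get?_insert_self]
      · refine ih _ _ ?_
        rw [PySem.Dict.get?_insert_of_ne st (pvRowDict t) (fun h' => hpk h'.symm)]
        simpa [hpk] using h

theorem pvST_get (table : List String) (k : String) :
    (pvScoreTable table).get? k = (pvEff k table).map pvRowDict := by
  exact pvST_get_aux k table PySem.Dict.empty none (by simp [PySem.Dict.get?_empty])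

theorem pvST_nodup_keys (table : List String) : (pvScoreTable table).keys.Nodup := by
  unfold pvScoreTable
  generalize hst : PySem.Dict.empty = st
  have h0 : st.keys.Nodup := by rw [← hst]; exact PySem.Dict.nodup_keys_empty
  clear hst
  induction table generalizing st with
  | nil => simpa using h0
  | cons col rest ih =>
    simp only [List.foldl_cons]
    cases hs : PySem.Str.split₀ col with
    | nil => exact ih st h0
    | cons p t =>
      simp only [PySem.List.pop?_zero_cons]
      exact ih _ (PySem.Dict.nodup_keys_insert _ _ _ h0)


-- ---------- row dicts ----------

theorem pvRowDict_keys (langs : List String) : (pvRowDict langs).keys = PySem.Set.ofList langs := by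
  unfold pvRowDict
  rw [PySem.Dict.keys_foldl_insert_key]
  simp [PySem.List.map_snd_enumerate, PySem.Dict.keys_empty, PySem.Set.update_nil_left]

theorem pvRowDict_contains (langs : List String) (l : String) :
    (pvRowDict langs).contains l = true ↔ l ∈ langs := by
  rw [PySem.Dict.contains_iff_mem_keys, pvRowDict_keys, PySem.Set.mem_ofList]

theorem pvRowDict_nodup_keys (langs : List String) : (pvRowDict langs).keys.Nodup := by
  rw [pvRowDict_keys]; exact PySem.Set.nodup_ofList langs

-- ---------- the effective row ----------

theorem pvEff_append (k : String) (table : List String) (r : String) :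
    pvEff k (table ++ [r]) =
      (match PySem.Str.split₀ r with
       | [] => pvEff k table
       | p :: rest => if p = k then some rest else pvEff k table) := by
  simp only [pvEff, List.foldl_append, List.foldl_cons, List.foldl_nil]

theorem pvEff_spec (k : String) (table : List String) (t : List String) (h : pvEff k table = some t) :
    ∃ i, ∃ hi : i < (pvToks table).length, (pvToks table)[i].head? = some k ∧ (pvToks table)[i].tail = t ∧
      ∀ j, ∀ hj : j < (pvToks table).length, i < j → (pvToks table)[j].head? ≠ some k := by
  induction table using List.reverseRecOn with
  | nil => simp [pvEff] at h
  | append_singleton table r ih =>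
    rw [pvEff_append] at h
    have htoks : pvToks (table ++ [r]) = pvToks table ++ [PySem.Str.split₀ r] := by
      simp [pvToks]
    cases hs : PySem.Str.split₀ r with
    | nil =>
      rw [hs] at h
      obtain ⟨i, hi, h1, h2, h3⟩ := ih h
      refine ⟨i, ?_, ?_, ?_, ?_⟩ <;> simp only [htoks]
      · simp; omega
      · rwa [List.getElem_append_left hi]
      · rwa [List.getElem_append_left hi]
      · intro j hj hij
        simp only [List.length_append, List.length_singleton] at hj
        rcases Nat.lt_or_ge j (pvToks table).length with hlt | hge
        · rw [List.getElem_append_left hlt]; exact h3 j hlt hij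
        · have hj' : j = (pvToks table).length := by omega
          subst hj'
          rw [List.getElem_concat_length rfl]
          simp [hs]
    | cons p rest =>
      rw [hs] at h
      by_cases hpk : p = k
      · subst hpk
        have h' : rest = t := by simpa using h
        refine ⟨(pvToks table).length, ?_, ?_, ?_, ?_⟩ <;> simp only [htoks]
        · simp
        · rw [List.getElem_concat_length rfl, hs]; rfl
        · rw [List.getElem_concat_length rfl, hs]; simpa using h' 
        · intro j hj hij
          simp only [List.length_append, List.length_singleton] at hj
          omega
      · replace h : pvEff k table = some t := by simpa [hpk] using h
        obtain ⟨i, hi, h1, h2, h3⟩ := ih h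
        refine ⟨i, ?_, ?_, ?_, ?_⟩ <;> simp only [htoks]
        · simp; omega
        · rwa [List.getElem_append_left hi]
        · rwa [List.getElem_append_left hi]
        · intro j hj hij
          simp only [List.length_append, List.length_singleton] at hj
          rcases Nat.lt_or_ge j (pvToks table).length with hlt | hge
          · rw [List.getElem_append_left hlt]; exact h3 j hlt hij
          · have hj' : j = (pvToks table).length := by omega
            subst hj'
            rw [List.getElem_concat_length rfl, hs]
            simp only [List.head?_cons, ne_eq, Option.some.injEq]
            exact hpk

-- ---------- what Pre_ gives about the score table ----------

theorem pvGood (table : List String) (languages : List String) (preference : List Int)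
    (hpre : Pre_solution table languages preference) :
    ∀ part d, (pvScoreTable table).get? part = some d →
      ∀ (j : Nat) l, languages[j]? = some l → d.contains l = true →
        part ∈ pvFIVE ∧ j < preference.length := by
  intro part d hget j l hl hcont
  rw [pvST_get] at hget
  cases heff : pvEff part table with
  | none => rw [heff] at hget; simp at hget
  | some tail =>
    rw [heff] at hget
    simp only [Option.map_some, Option.some.injEq] at hget
    obtain ⟨i, hi, h1, h2, h3⟩ := pvEff_spec part table tail heff
    have hp : ((pvToks table)[i], i) ∈ (pvToks table).zipIdx := by
      rw [List.mem_zipIdx_iff_getElem?]; simp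
    have hr : (l, j) ∈ languages.zipIdx := by
      rw [List.mem_zipIdx_iff_getElem?]; simpa using hl
    have hmem : l ∈ (pvToks table)[i].tail := by
      rw [h2]
      rw [← hget] at hcont
      exact (pvRowDict_contains tail l).mp hcont
    have hlast : ∀ q ∈ (pvToks table).zipIdx, ((pvToks table)[i], i).2 < q.2 →
        q.1.head? ≠ ((pvToks table)[i], i).1.head? := by
      intro q hq hlt
      rw [List.mem_zipIdx_iff_getElem?] at hq
      have hq2 : q.2 < (pvToks table).length := by
        by_contra hge
        rw [List.getElem?_eq_none (by omega)] at hq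
        simp at hq
      have hq1 : q.1 = (pvToks table)[q.2] := by
        rw [List.getElem?_eq_getElem hq2] at hq
        exact (Option.some.injEq _ _ ▸ hq).symm
      rw [hq1, h1]
      exact h3 q.2 hq2 hlt
    have := hpre.2 ((pvToks table)[i], i) hp hlast (l, j) hr hmem
    rw [h1] at this
    obtain ⟨hfive, hlen⟩ := this
    refine ⟨?_, hlen⟩
    simpa using hfive


-- ---------- value of A's result dict ----------

theorem pvDrop_headD (ps : List Int) (s : Nat) : (ps.drop s).headD 0 = ps.getD s 0 := by
  simp [List.headD_eq_head?, List.head?_eq_getElem?, List.getElem?_drop, List.getD]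

theorem pvInnerD (table : List String) (preference : List Int) (i : Int) (l : String) (k : String) :
    ∀ (ps : List String) (res : PySem.Dict String Int), ps.Nodup →
      (ps.foldl (fun res part =>
        let d := (pvScoreTable table).getD part PySem.Dict.empty
        if d.contains l then
          res.modify part 0 (fun w => w + d.getD l 0 * PySem.List.pyGetD preference i 0)
        else res) res).getD k 0
      = res.getD k 0 +
        (if k ∈ ps then pvTerm ((pvScoreTable table).get? k) l (PySem.List.pyGetD preference i 0) else 0) := by
  intro ps
  induction ps with
  | nil => intro res _; simp
  | cons a ps ih =>
    intro res hnd
    have hnotmem : a ∉ ps := (List.nodup_cons.mp hnd).1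
    have hnd' : ps.Nodup := (List.nodup_cons.mp hnd).2
    simp only [List.foldl_cons]
    by_cases hak : a = k
    · subst hak
      rw [ih _ hnd', if_neg hnotmem, if_pos List.mem_cons_self]
      cases hg : (pvScoreTable table).get? a with
      | none =>
        have hda : (pvScoreTable table).getD a PySem.Dict.empty = PySem.Dict.empty := by
          rw [PySem.Dict.getD_eq_get?_getD, hg]; rfl
        simp [hda, PySem.Dict.contains_empty, pvTerm]
      | some d =>
        have hda : (pvScoreTable table).getD a PySem.Dict.empty = d := by
          rw [PySem.Dict.getD_eq_get?_getD, hg]; rfl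
        simp only [hda, pvTerm]
        by_cases hc : d.contains l = true
        · simp only [hc, if_true]
          rw [PySem.Dict.getD_modify_self]
          ring
        · simp [hc]
    · have hka : k ≠ a := fun h => hak h.symm
      by_cases hc : ((pvScoreTable table).getD a PySem.Dict.empty).contains l = true
      · simp only [hc, if_true]
        rw [ih _ hnd', PySem.Dict.getD_modify, if_neg hka]
        congr 1
        simp [List.mem_cons, hka]
      · simp only [hc, Bool.false_eq_true, if_false]
        rw [ih _ hnd']
        congr 1
        simp [List.mem_cons, hka]

theorem pvOuterA (table : List String) (preference : List Int) (k : String) :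
    ∀ (ls : List String) (s : Nat) (res : PySem.Dict String Int),
      ((PySem.List.enumerate ls (s : Int)).foldl (fun res p =>
        (pvScoreTable table).keys.foldl (fun res part =>
          let d := (pvScoreTable table).getD part PySem.Dict.empty
          if d.contains p.2 then
            res.modify part 0 (fun w => w + d.getD p.2 0 * PySem.List.pyGetD preference p.1 0)
          else res) res) res).getD k 0
      = res.getD k 0 + pvSumA ((pvScoreTable table).get? k) ls (preference.drop s) := by
  intro ls
  induction ls with
  | nil => intro s res; simp [PySem.List.enumerate, pvSumA]
  | cons l ls ih =>
    intro s res
    rw [PySem.List.enumerate_cons, List.foldl_cons]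
    have hcast : (s : Int) + 1 = ((s + 1 : Nat) : Int) := by push_cast; ring
    rw [hcast, ih (s + 1)]
    rw [pvInnerD table preference (s : Int) l k _ _ (pvST_nodup_keys table)]
    have hterm : (if k ∈ (pvScoreTable table).keys then
        pvTerm ((pvScoreTable table).get? k) l (PySem.List.pyGetD preference (s : Int) 0) else 0)
        = pvTerm ((pvScoreTable table).get? k) l (PySem.List.pyGetD preference (s : Int) 0) := by
      by_cases hmem : k ∈ (pvScoreTable table).keys
      · rw [if_pos hmem]
      · rw [if_neg hmem]
        rw [(PySem.Dict.get?_eq_none_iff_not_mem_keys _ _).mpr hmem]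
        rfl
    rw [hterm]
    show _ = res.getD k 0 + pvSumA _ (l :: ls) (preference.drop s)
    rw [show pvSumA ((pvScoreTable table).get? k) (l :: ls) (preference.drop s)
        = pvTerm ((pvScoreTable table).get? k) l ((preference.drop s).headD 0)
          + pvSumA ((pvScoreTable table).get? k) ls (preference.drop s).tail from rfl]
    rw [pvDrop_headD, List.tail_drop]
    have hpg : PySem.List.pyGetD preference (s : Int) 0 = preference.getD s 0 := by
      simp
    rw [hpg]
    ring

theorem pvRes0_getD (k : String) :
    (PySem.Dict.ofList [("SI", (0:Int)), ("CONTENTS", 0), ("HARDWARE", 0), ("PORTAL", 0), ("GAME", 0)]).getD k 0 = 0 := by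
  by_cases hc : (PySem.Dict.ofList [("SI", (0:Int)), ("CONTENTS", 0), ("HARDWARE", 0), ("PORTAL", 0), ("GAME", 0)]).contains k = true
  · have hk : k ∈ pvFIVE := by
      have hkeys : (PySem.Dict.ofList [("SI", (0:Int)), ("CONTENTS", 0), ("HARDWARE", 0), ("PORTAL", 0), ("GAME", 0)]).keys = pvFIVE := by decide
      rw [← hkeys]
      exact (PySem.Dict.contains_iff_mem_keys _ _).mp hc
    fin_cases hk <;> decide
  · exact PySem.Dict.getD_of_not_contains _ _ (by simpa using hc)

theorem pvValA (table : List String) (languages : List String) (preference : List Int) (k : String) :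
    (pvResultA table languages preference).getD k 0
      = pvSumA ((pvScoreTable table).get? k) languages preference := by
  unfold pvResultA
  have h := pvOuterA table preference k languages 0
    (PySem.Dict.ofList [("SI", 0), ("CONTENTS", 0), ("HARDWARE", 0), ("PORTAL", 0), ("GAME", 0)])
  simp only [Nat.cast_zero, List.drop_zero] at h
  rw [h, pvRes0_getD, zero_add]

-- ---------- keys of A's result dict (under Pre_) ----------

theorem pvKeysA_inner (table : List String) (languages : List String) (preference : List Int)
    (hpre : Pre_solution table languages preference) (i : Int) (l : String)
    (hl : ∃ j : Nat, languages[j]? = some l) :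
    ∀ (ps : List String) (res : PySem.Dict String Int), res.keys = pvFIVE →
      (ps.foldl (fun res part =>
        let d := (pvScoreTable table).getD part PySem.Dict.empty
        if d.contains l then
          res.modify part 0 (fun w => w + d.getD l 0 * PySem.List.pyGetD preference i 0)
        else res) res).keys = pvFIVE := by
  intro ps
  induction ps with
  | nil => intro res h; simpa using h
  | cons a ps ih =>
    intro res hres
    simp only [List.foldl_cons]
    by_cases hc : ((pvScoreTable table).getD a PySem.Dict.empty).contains l = true
    · simp only [hc, if_true]
      refine ih _ ?_
      cases hg : (pvScoreTable table).get? a with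
      | none =>
        exfalso
        rw [PySem.Dict.getD_eq_get?_getD, hg] at hc
        simp [PySem.Dict.contains_empty] at hc
      | some d =>
        obtain ⟨j, hj⟩ := hl
        have hda : (pvScoreTable table).getD a PySem.Dict.empty = d := by
          rw [PySem.Dict.getD_eq_get?_getD, hg]; rfl
        rw [hda] at hc
        have hfive := (pvGood table languages preference hpre a d hg j l hj hc).1
        have hcontains : res.contains a = true := by
          rw [PySem.Dict.contains_iff_mem_keys, hres]; exact hfive
        rw [PySem.Dict.keys_modify, PySem.Dict.keys_insert_of_contains _ _ hcontains]
        exact hres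
    · simp only [hc, Bool.false_eq_true, if_false]
      exact ih _ hres

theorem pvKeysA (table : List String) (languages : List String) (preference : List Int)
    (hpre : Pre_solution table languages preference) :
    (pvResultA table languages preference).keys = pvFIVE := by
  unfold pvResultA
  have base : (PySem.Dict.ofList [("SI", (0:Int)), ("CONTENTS", 0), ("HARDWARE", 0), ("PORTAL", 0), ("GAME", 0)]).keys = pvFIVE := by decide
  have main : ∀ (E : List (Int × String)), (∀ q ∈ E, ∃ j : Nat, languages[j]? = some q.2) →
      ∀ res : PySem.Dict String Int, res.keys = pvFIVE →
      (E.foldl (fun res p =>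
        (pvScoreTable table).keys.foldl (fun res part =>
          let d := (pvScoreTable table).getD part PySem.Dict.empty
          if d.contains p.2 then
            res.modify part 0 (fun w => w + d.getD p.2 0 * PySem.List.pyGetD preference p.1 0)
          else res) res) res).keys = pvFIVE := by
    intro E
    induction E with
    | nil => intro _ res h; simpa using h
    | cons q E ih =>
      intro hq res hres
      simp only [List.foldl_cons]
      refine ih (fun q' hq' => hq q' (List.mem_cons_of_mem _ hq')) _ ?_
      exact pvKeysA_inner table languages preference hpre q.1 q.2
        (hq q List.mem_cons_self) _ res hres
  refine main _ ?_ _ base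
  intro q hq
  rw [PySem.List.mem_enumerate_iff] at hq
  obtain ⟨j, hj, hq'⟩ := hq
  refine ⟨j, ?_⟩
  rw [hq']
  simp [List.getElem?_eq_getElem hj]

-- ---------- B's scores dict ----------

theorem pvEffAux_isSome (k : String) :
    ∀ (rest : List String) (t : List String),
      (rest.foldl (fun acc r =>
        match PySem.Str.split₀ r with
        | [] => acc
        | p :: rs => if p = k then some rs else acc) (some t)) ≠ none := by
  intro rest
  induction rest with
  | nil => intro t; simp
  | cons r rest ih =>
    intro t
    simp only [List.foldl_cons]
    cases hs : PySem.Str.split₀ r with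
    | nil => exact ih t
    | cons p rs =>
      dsimp only
      by_cases hpk : p = k
      · rw [if_pos hpk]; exact ih rs
      · rw [if_neg hpk]; exact ih t

theorem pvValB (languages : List String) (preference : List Int) (k : String) :
    ∀ (table : List String) (sc : PySem.Dict String Int) (acc : Option (List String)),
      sc.keys = pvFIVE → k ∈ pvFIVE →
      (∀ t, acc = some t → sc.getD k 0 = pvRowSum (pvPrefDict languages preference) t) →
      (table.foldl (fun sc row =>
        match PySem.Str.split₀ row with
        | [] => sc
        | part :: langs =>
          if sc.contains part then sc.insert part (pvRowSum (pvPrefDict languages preference) langs)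
          else sc) sc).keys = pvFIVE ∧
      (table.foldl (fun sc row =>
        match PySem.Str.split₀ row with
        | [] => sc
        | part :: langs =>
          if sc.contains part then sc.insert part (pvRowSum (pvPrefDict languages preference) langs)
          else sc) sc).getD k 0
        = (match table.foldl (fun acc r =>
            match PySem.Str.split₀ r with
            | [] => acc
            | p :: rest => if p = k then some rest else acc) acc with
          | some t => pvRowSum (pvPrefDict languages preference) t
          | none => sc.getD k 0) := by
  intro table
  induction table with
  | nil =>
    intro sc acc hkeys hk hacc
    refine ⟨by simpa using hkeys, ?_⟩
    simp only [List.foldl_nil]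
    cases acc with
    | none => rfl
    | some t => simpa using hacc t rfl
  | cons row rest ih =>
    intro sc acc hkeys hk hacc
    simp only [List.foldl_cons]
    cases hs : PySem.Str.split₀ row with
    | nil => exact ih sc acc hkeys hk hacc
    | cons part langs =>
      by_cases hpk : part = k
      · subst hpk
        have hc : sc.contains part = true := by
          rw [PySem.Dict.contains_iff_mem_keys, hkeys]; exact hk
        simp only [hc, if_true, if_pos rfl]
        have hkeys' : (sc.insert part (pvRowSum (pvPrefDict languages preference) langs)).keys = pvFIVE := by
          rw [PySem.Dict.keys_insert_of_contains _ _ hc]; exact hkeys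
        obtain ⟨ihk, ihv⟩ := ih _ (some langs) hkeys' hk
          (by intro t ht
              have ht' : langs = t := by simpa using ht
              subst ht'
              rw [PySem.Dict.getD_insert_self])
        refine ⟨ihk, ?_⟩
        rw [ihv]
        cases hf : (rest.foldl (fun acc r =>
            match PySem.Str.split₀ r with
            | [] => acc
            | p :: rs => if p = part then some rs else acc) (some langs)) with
        | some u => simp only [hf]
        | none => exact absurd hf (pvEffAux_isSome part rest langs)
      · by_cases hc : sc.contains part = true
        · simp only [hc, if_true, if_neg hpk]
          have hkeys' : (sc.insert part (pvRowSum (pvPrefDict languages preference) langs)).keys = pvFIVE := by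
            rw [PySem.Dict.keys_insert_of_contains _ _ hc]; exact hkeys
          have hne : k ≠ part := fun h => hpk h.symm
          obtain ⟨ihk, ihv⟩ := ih _ acc hkeys' hk
            (by intro t ht
                rw [PySem.Dict.getD_insert_of_ne _ _ _ hne]
                exact hacc t ht)
          refine ⟨ihk, ?_⟩
          rw [ihv]
          cases hf : (rest.foldl (fun acc r =>
              match PySem.Str.split₀ r with
              | [] => acc
              | p :: rs => if p = k then some rs else acc) acc) with
          | some u => simp only [hf]
          | none =>
            simp only [hf]
            rw [PySem.Dict.getD_insert_of_ne _ _ _ hne]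
        · simp only [hc, Bool.false_eq_true, if_false, if_neg hpk]
          exact ih sc acc hkeys hk hacc


-- ---------- the two accumulated values agree ----------

theorem pvSumA_none : ∀ (ls : List String) (ps : List Int), pvSumA none ls ps = 0 := by
  intro ls
  induction ls with
  | nil => intro ps; rfl
  | cons l ls ih => intro ps; show pvTerm none l _ + pvSumA none ls ps.tail = 0; rw [ih]; rfl

theorem pvTrunc (d : PySem.Dict String Int) :
    ∀ (ls : List String) (ps : List Int),
      (∀ (j : Nat) l', ls[j]? = some l' → d.contains l' = true → j < ps.length) →
      pvSumA (some d) ls ps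
        = ((ls.zip ps).map (fun lp => if d.contains lp.1 then d.getD lp.1 0 * lp.2 else 0)).sum := by
  intro ls
  induction ls with
  | nil => intro ps h; simp [pvSumA]
  | cons l ls ih =>
    intro ps h
    cases ps with
    | nil =>
      have hc : d.contains l = false := by
        cases hcl : d.contains l with
        | false => rfl
        | true => exact absurd (h 0 l (by simp) hcl) (by simp)
      have hrest : pvSumA (some d) ls [] = 0 := by
        rw [ih [] (fun j l' hj hcont => absurd (h (j+1) l' (by simpa using hj) hcont) (by simp))]
        simp
      show pvTerm (some d) l (([] : List Int).headD 0) + pvSumA (some d) ls (([] : List Int).tail) = _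
      rw [show (([] : List Int).tail) = ([] : List Int) from rfl, hrest]
      simp [pvTerm, hc]
    | cons p ps' =>
      show pvTerm (some d) l ((p :: ps').headD 0) + pvSumA (some d) ls (p :: ps').tail = _
      simp only [List.headD_cons, List.tail_cons, List.zip_cons_cons, List.map_cons, List.sum_cons]
      rw [ih ps' (fun j l' hj hcont => by
        have := h (j+1) l' (by simpa using hj) hcont
        simpa using this)]
      rfl

theorem pvPrefD_getD :
    ∀ (zl : List (String × Int)) (d : PySem.Dict String Int) (l : String),
      (zl.foldl (fun d lp => d.insert lp.1 (d.getD lp.1 0 + lp.2)) d).getD l 0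
        = d.getD l 0 + (zl.map (fun lp => if lp.1 = l then lp.2 else 0)).sum := by
  intro zl
  induction zl with
  | nil => intro d l; simp
  | cons lp zl ih =>
    intro d l
    simp only [List.foldl_cons, List.map_cons, List.sum_cons]
    rw [ih]
    rw [PySem.Dict.getD_insert]
    by_cases hl : l = lp.1
    · rw [if_pos hl, if_pos hl.symm, hl]
      ring
    · rw [if_neg hl, if_neg (fun h => hl h.symm)]
      ring

theorem pvDelta (D : PySem.Dict String Int) (hnd : D.keys.Nodup) (l0 : String) (x : Int) :
    (D.items.map (fun ls => ls.2 * (if l0 = ls.1 then x else 0))).sum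
      = if D.contains l0 then D.getD l0 0 * x else 0 := by
  cases hc : D.contains l0 with
  | false =>
    simp only [Bool.false_eq_true, if_false]
    apply List.sum_eq_zero
    intro y hy
    obtain ⟨p, hp, hpy⟩ := List.mem_map.mp hy
    have hne : l0 ≠ p.1 := by
      intro h
      have : D.contains l0 = true := by
        rw [PySem.Dict.contains_iff_mem_keys]
        simp only [PySem.Dict.keys]
        exact List.mem_map.mpr ⟨p, hp, h.symm⟩
      rw [this] at hc; exact Bool.noConfusion hc
    rw [← hpy, if_neg hne, mul_zero]
  | true =>
    simp only [if_true]
    have hl0 : l0 ∈ D.keys := (PySem.Dict.contains_iff_mem_keys _ _).mp hc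
    simp only [PySem.Dict.keys] at hl0
    obtain ⟨p, hp, hp1⟩ := List.mem_map.mp hl0
    obtain ⟨L1, L2, hsplit⟩ := List.append_of_mem hp
    have hgd : D.getD l0 0 = p.2 := by
      have : (l0, p.2) ∈ D.items := by rw [← hp1]; simpa using hp
      exact PySem.Dict.getD_of_mem_items D this hnd 0
    have hndf : (D.items.map (·.1)).Nodup := by
      simpa only [PySem.Dict.keys] using hnd
    rw [hsplit] at hndf
    have hnotL1 : ∀ q ∈ L1, q.1 ≠ l0 := by
      intro q hq
      simp only [List.map_append, List.map_cons, List.nodup_append] at hndf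
      intro hql
      have h1 : q.1 ∈ L1.map (·.1) := List.mem_map.mpr ⟨q, hq, rfl⟩
      have h2 : q.1 ∈ (p :: L2).map (·.1) := by simp [hp1, hql]
      exact hndf.2.2 q.1 h1 q.1 (by simpa using h2) rfl
    have hnotL2 : ∀ q ∈ L2, q.1 ≠ l0 := by
      intro q hq
      simp only [List.map_append, List.map_cons, List.nodup_append] at hndf
      intro hql
      have hthis := hndf.2.1
      rw [List.nodup_cons] at hthis
      have hmem : q.1 ∈ L2.map (·.1) := List.mem_map.mpr ⟨q, hq, rfl⟩
      rw [hql, ← hp1] at hmem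
      exact hthis.1 hmem
    rw [hsplit, List.map_append, List.sum_append, List.map_cons, List.sum_cons]
    have hz1 : (L1.map (fun ls => ls.2 * (if l0 = ls.1 then x else 0))).sum = 0 := by
      apply List.sum_eq_zero
      intro y hy
      obtain ⟨q, hq, hqy⟩ := List.mem_map.mp hy
      rw [← hqy, if_neg (fun h => hnotL1 q hq h.symm), mul_zero]
    have hz2 : (L2.map (fun ls => ls.2 * (if l0 = ls.1 then x else 0))).sum = 0 := by
      apply List.sum_eq_zero
      intro y hy
      obtain ⟨q, hq, hqy⟩ := List.mem_map.mp hy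
      rw [← hqy, if_neg (fun h => hnotL2 q hq h.symm), mul_zero]
    rw [hz1, hz2, hgd, if_pos hp1.symm]
    ring

theorem pvZswap (D : PySem.Dict String Int) (hnd : D.keys.Nodup) :
    ∀ (zl : List (String × Int)),
      (zl.map (fun lp => if D.contains lp.1 then D.getD lp.1 0 * lp.2 else 0)).sum
        = (D.items.map (fun ls => ls.2 * (zl.map (fun lp => if lp.1 = ls.1 then lp.2 else 0)).sum)).sum := by
  intro zl
  induction zl with
  | nil => simp
  | cons lp zl ih =>
    simp only [List.map_cons, List.sum_cons]
    rw [ih]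
    have hsplit : (D.items.map (fun ls =>
        ls.2 * ((if lp.1 = ls.1 then lp.2 else 0) + (zl.map (fun lq => if lq.1 = ls.1 then lq.2 else 0)).sum))).sum
        = (D.items.map (fun ls => ls.2 * (if lp.1 = ls.1 then lp.2 else 0))).sum
          + (D.items.map (fun ls => ls.2 * (zl.map (fun lq => if lq.1 = ls.1 then lq.2 else 0)).sum)).sum := by
      rw [← PySem.List.sum_map_add_int]
      congr 1
      apply List.map_congr_left
      intro ls _
      ring
    rw [hsplit, pvDelta D hnd lp.1 lp.2]

theorem pvRowSum_eq (pref : PySem.Dict String Int) (langs : List String) :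
    pvRowSum pref langs = ((pvRowDict langs).items.map (fun ls => ls.2 * pref.getD ls.1 0)).sum := by
  unfold pvRowSum
  rw [PySem.List.foldl_add]
  simp

theorem pvBridge (table : List String) (languages : List String) (preference : List Int)
    (hpre : Pre_solution table languages preference) (k : String) :
    pvSumA ((pvScoreTable table).get? k) languages preference
      = (match pvEff k table with
         | none => 0
         | some tail => pvRowSum (pvPrefDict languages preference) tail) := by
  cases heff : pvEff k table with
  | none =>
    rw [pvST_get, heff]
    exact pvSumA_none languages preference
  | some tail =>
    rw [pvST_get, heff]
    simp only [Option.map_some]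
    have hDnd := pvRowDict_nodup_keys tail
    have hget : (pvScoreTable table).get? k = some (pvRowDict tail) := by
      rw [pvST_get, heff]; rfl
    have hcond : ∀ (j : Nat) l', languages[j]? = some l' →
        (pvRowDict tail).contains l' = true → j < preference.length := by
      intro j l' hj hcont
      exact (pvGood table languages preference hpre k (pvRowDict tail) hget j l' hj hcont).2
    rw [pvTrunc (pvRowDict tail) languages preference hcond]
    rw [pvZswap (pvRowDict tail) hDnd (languages.zip preference)]
    rw [pvRowSum_eq]
    congr 1
    apply List.map_congr_left
    intro ls _
    congr 1
    unfold pvPrefDict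
    rw [pvPrefD_getD]
    simp [PySem.Dict.getD_empty]

theorem pvValB_none (table : List String) (languages : List String) (preference : List Int)
    (k : String) (hk : k ∈ pvFIVE) :
    (pvScoresB table languages preference).getD k 0
      = (match pvEff k table with
         | none => 0
         | some t => pvRowSum (pvPrefDict languages preference) t) := by
  have hb := (pvValB languages preference k table
    (PySem.Dict.ofList [("SI", 0), ("CONTENTS", 0), ("HARDWARE", 0), ("PORTAL", 0), ("GAME", 0)])
    none (by decide) hk (by intro t ht; simp at ht)).2
  unfold pvScoresB
  rw [hb]
  show (match pvEff k table with
        | some t => pvRowSum (pvPrefDict languages preference) t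
        | none => (PySem.Dict.ofList [("SI", (0:Int)), ("CONTENTS", 0), ("HARDWARE", 0), ("PORTAL", 0), ("GAME", 0)]).getD k 0)
      = (match pvEff k table with
        | none => 0
        | some t => pvRowSum (pvPrefDict languages preference) t)
  cases pvEff k table with
  | none => simp [pvRes0_getD]
  | some t => rfl

theorem pvVal_eq (table : List String) (languages : List String) (preference : List Int)
    (hpre : Pre_solution table languages preference) (k : String) (hk : k ∈ pvFIVE) :
    (pvResultA table languages preference).getD k 0
      = (pvScoresB table languages preference).getD k 0 := by
  rw [pvValA, pvBridge table languages preference hpre k, pvValB_none table languages preference k hk]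

theorem pvKeysB (table : List String) (languages : List String) (preference : List Int) :
    (pvScoresB table languages preference).keys = pvFIVE := by
  unfold pvScoresB
  exact (pvValB languages preference "SI" table
    (PySem.Dict.ofList [("SI", 0), ("CONTENTS", 0), ("HARDWARE", 0), ("PORTAL", 0), ("GAME", 0)])
    none (by decide) (by decide) (by intro t ht; simp at ht)).1


-- ---------- picking the winner: head of the sort = min with the tuple key ----------

theorem pvInsertBy_pairwise (x : Int × String) :
    ∀ (ys : List (Int × String)), ys.Pairwise (fun a b => pvLt b a = false) →
      (PySem.List.insertBy pvLt x ys).Pairwise (fun a b => pvLt b a = false) := by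
  intro ys
  induction ys with
  | nil =>
    intro _
    show ([x] : List (Int × String)).Pairwise _
    simp
  | cons y ys ih =>
    intro h
    obtain ⟨hy, hys⟩ := List.pairwise_cons.mp h
    show (if pvLt x y = true then x :: y :: ys else y :: PySem.List.insertBy pvLt x ys).Pairwise _
    by_cases hxy : pvLt x y = true
    · rw [if_pos hxy]
      refine List.pairwise_cons.mpr ⟨?_, h⟩
      intro b hb
      rcases List.mem_cons.mp hb with hb | hb
      · subst hb; exact pvLt_asymm hxy
      · cases hbx : pvLt b x with
        | false => rfl
        | true =>
          have : pvLt b y = true := pvLt_trans hbx hxy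
          rw [hy b hb] at this
          exact Bool.noConfusion this
    · rw [if_neg hxy]
      refine List.pairwise_cons.mpr ⟨?_, ih hys⟩
      intro b hb
      rcases (PySem.List.insertBy_mem_iff pvLt x b ys).mp hb with hb | hb
      · subst hb
        simpa using hxy
      · exact hy b hb

theorem pvSortFold_pairwise :
    ∀ (xs acc : List (Int × String)), acc.Pairwise (fun a b => pvLt b a = false) →
      (xs.foldl (fun acc x => PySem.List.insertBy pvLt x acc) acc).Pairwise
        (fun a b => pvLt b a = false) := by
  intro xs
  induction xs with
  | nil => intro acc h; simpa using h
  | cons x xs ih =>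
    intro acc h
    simp only [List.foldl_cons]
    exact ih _ (pvInsertBy_pairwise x acc h)

theorem pvMinFold (v : String → Int) :
    ∀ (ks : List String) (m0 : String),
      ∃ m, ks.foldl (fun acc x =>
          match acc with
          | none => some x
          | some m => if pvLt (v x, x) (v m, m) then some x else some m) (some m0) = some m ∧
        m ∈ m0 :: ks ∧ ∀ y ∈ m0 :: ks, pvLt (v y, y) (v m, m) = false := by
  intro ks
  induction ks with
  | nil =>
    intro m0
    exact ⟨m0, rfl, List.mem_cons_self, by
      intro y hy
      rcases List.mem_cons.mp hy with h | h
      · subst h; exact pvLt_irrefl _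
      · simp at h⟩
  | cons x ks ih =>
    intro m0
    simp only [List.foldl_cons]
    by_cases hcond : pvLt (v x, x) (v m0, m0) = true
    · rw [if_pos hcond]
      obtain ⟨m, hm, hmem, hmin⟩ := ih x
      refine ⟨m, hm, ?_, ?_⟩
      · rcases List.mem_cons.mp hmem with h | h
        · subst h; exact List.mem_cons_of_mem _ List.mem_cons_self
        · exact List.mem_cons_of_mem _ (List.mem_cons_of_mem _ h)
      · intro y hy
        rcases List.mem_cons.mp hy with h | h
        · subst h
          cases hym : pvLt (v y, y) (v m, m) with
          | false => rfl
          | true =>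
            have hxm : pvLt (v x, x) (v m, m) = false := hmin x List.mem_cons_self
            have : pvLt (v y, y) (v m, m) = true := hym
            have hcontr : pvLt (v x, x) (v m, m) = true := pvLt_trans hcond hym
            rw [hxm] at hcontr
            exact Bool.noConfusion hcontr
        · exact hmin y h
    · rw [if_neg hcond]
      obtain ⟨m, hm, hmem, hmin⟩ := ih m0
      refine ⟨m, hm, ?_, ?_⟩
      · rcases List.mem_cons.mp hmem with h | h
        · subst h; exact List.mem_cons_self
        · exact List.mem_cons_of_mem _ (List.mem_cons_of_mem _ h)
      · intro y hy
        have hcond' : pvLt (v x, x) (v m0, m0) = false := by simpa using hcond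
        rcases List.mem_cons.mp hy with h | h
        · subst h
          exact hmin y (by simp)
        · rcases List.mem_cons.mp h with h' | h'
          · subst h'
            cases hym : pvLt (v y, y) (v m, m) with
            | false => rfl
            | true =>
              have hm0m : pvLt (v m0, m0) (v m, m) = false := hmin m0 List.mem_cons_self
              by_cases hm0y : pvLt (v m0, m0) (v y, y) = true
              · have := pvLt_trans hm0y hym
                rw [hm0m] at this
                exact Bool.noConfusion this
              · have heq := pvLt_conn hcond' (by simpa using hm0y)
                have : pvLt (v m0, m0) (v m, m) = true := heq ▸ hym
                rw [hm0m] at this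
                exact Bool.noConfusion this
          · exact hmin y (List.mem_cons_of_mem _ h')

theorem pvMin2Congr (f g : String → Int) :
    ∀ (ks : List String) (acc : Option String),
      (∀ x ∈ ks, f x = g x) → (∀ m, acc = some m → f m = g m) →
      ks.foldl (fun acc x =>
          match acc with
          | none => some x
          | some m => if pvLt (f x, x) (f m, m) then some x else some m) acc
        = ks.foldl (fun acc x =>
          match acc with
          | none => some x
          | some m => if pvLt (g x, x) (g m, m) then some x else some m) acc := by
  intro ks
  induction ks with
  | nil => intro acc _ _; rfl
  | cons x ks ih =>
    intro acc hks hacc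
    simp only [List.foldl_cons]
    cases acc with
    | none =>
      exact ih (some x) (fun y hy => hks y (List.mem_cons_of_mem _ hy))
        (fun m hm => by cases hm; exact hks x List.mem_cons_self)
    | some m =>
      dsimp only
      have hfx : f x = g x := hks x List.mem_cons_self
      have hfm : f m = g m := hacc m rfl
      rw [show pvLt (f x, x) (f m, m) = pvLt (g x, x) (g m, m) by rw [hfx, hfm]]
      by_cases hc : pvLt (g x, x) (g m, m) = true
      · rw [if_pos hc]
        exact ih (some x) (fun y hy => hks y (List.mem_cons_of_mem _ hy))
          (fun m' hm' => by cases hm'; exact hfx)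
      · rw [if_neg hc]
        exact ih (some m) (fun y hy => hks y (List.mem_cons_of_mem _ hy))
          (fun m' hm' => by cases hm'; exact hfm)

theorem pvMin2_eq_fold (v : String → Int) (ks : List String) :
    PySem.List.min2? ks (fun k => -(v k)) (fun k => k)
      = ks.foldl (fun acc x =>
          match acc with
          | none => some x
          | some m => if pvLt (v x, x) (v m, m) then some x else some m) none := by
  simp only [PySem.List.min2?]
  congr 1
  funext acc x
  cases acc <;> rfl

theorem pvFinal (ks : List String) (hne : ks ≠ []) (v : String → Int) :
    (match PySem.List.pyGet?
        (PySem.List.sorted2 (ks.map (fun k => (v k, k))) (fun x => -x.1) (fun x => x.2)) 0 with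
     | some x => x.2
     | none => "")
    = (match PySem.List.min2? ks (fun k => -(v k)) (fun k => k) with
       | some k => k
       | none => "") := by
  have hsrt : PySem.List.sorted2 (ks.map (fun k => (v k, k))) (fun x => -x.1) (fun x => x.2)
      = (ks.map (fun k => (v k, k))).foldl (fun acc x => PySem.List.insertBy pvLt x acc) [] := rfl
  have hperm := PySem.List.sorted2_perm (ks.map (fun k => (v k, k))) (fun x => -x.1) (fun x => x.2) false
  have hpw := pvSortFold_pairwise (ks.map (fun k => (v k, k))) [] (by simp)
  rw [← hsrt] at hpw
  cases hsc : PySem.List.sorted2 (ks.map (fun k => (v k, k))) (fun x => -x.1) (fun x => x.2) with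
  | nil =>
    exfalso
    rw [hsc] at hperm
    have := hperm.length_eq
    simp only [List.length_nil, List.length_map] at this
    exact hne (List.eq_nil_of_length_eq_zero this.symm)
  | cons m t =>
    rw [hsc] at hperm hpw
    have hminA : ∀ y ∈ ks.map (fun k => (v k, k)), pvLt y m = false := by
      intro y hy
      have hy' : y ∈ m :: t := (hperm.mem_iff).mpr hy
      rcases List.mem_cons.mp hy' with h | h
      · rw [h]; exact pvLt_irrefl m
      · exact (List.pairwise_cons.mp hpw).1 y h
    obtain ⟨km, hkm, hkmeq⟩ := List.mem_map.mp ((hperm.mem_iff).mp List.mem_cons_self)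
    cases ks with
    | nil => exact absurd rfl hne
    | cons k0 kr =>
      have hfold : PySem.List.min2? (k0 :: kr) (fun k => -(v k)) (fun k => k)
          = kr.foldl (fun acc x =>
              match acc with
              | none => some x
              | some m => if pvLt (v x, x) (v m, m) then some x else some m) (some k0) := by
        rw [pvMin2_eq_fold v (k0 :: kr), List.foldl_cons]
      obtain ⟨m2, hm2, hm2mem, hm2min⟩ := pvMinFold v kr k0
      rw [hfold, hm2]
      have h1 : pvLt (v m2, m2) (v km, km) = false := by
        have : (v m2, m2) ∈ (k0 :: kr).map (fun k => (v k, k)) :=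
          List.mem_map.mpr ⟨m2, hm2mem, rfl⟩
        have := hminA _ this
        rwa [hkmeq]
      have h2 : pvLt (v km, km) (v m2, m2) = false := hm2min km hkm
      have heq := pvLt_conn h2 h1
      have hkm2 : km = m2 := congrArg Prod.snd heq
      rw [PySem.List.pyGet?_zero_cons]
      show m.2 = m2
      rw [← hkmeq, ← hkm2]

-- ---------- main assembly ----------

theorem pvMain (table : List String) (languages : List String) (preference : List Int)
    (hpre : Pre_solution table languages preference) :
    solution table languages preference = solution_alt table languages preference := by
  have hkA := pvKeysA table languages preference hpre
  have hndA : (pvResultA table languages preference).keys.Nodup := by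
    rw [hkA]; decide
  have hitems : (pvResultA table languages preference).items
      = pvFIVE.map (fun k => (k, (pvResultA table languages preference).getD k 0)) := by
    rw [PySem.Dict.items_eq_map_keys _ hndA 0, hkA]
  have hmap : (pvResultA table languages preference).items.map (fun kv => (kv.2, kv.1))
      = pvFIVE.map (fun k => ((pvResultA table languages preference).getD k 0, k)) := by
    rw [hitems, List.map_map]
    rfl
  show (match PySem.List.pyGet?
      (PySem.List.sorted2 ((pvResultA table languages preference).items.map (fun kv => (kv.2, kv.1)))
        (fun x => -x.1) (fun x => x.2)) 0 with
    | some x => x.2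
    | none => "") = solution_alt table languages preference
  rw [hmap]
  rw [pvFinal pvFIVE (by decide) (fun k => (pvResultA table languages preference).getD k 0)]
  show _ = (match PySem.List.min2? (pvScoresB table languages preference).keys
      (fun k => -((pvScoresB table languages preference).getD k 0)) (fun k => k) with
    | some k => k
    | none => "")
  rw [pvKeysB table languages preference]
  have hcongr : PySem.List.min2? pvFIVE (fun k => -((pvResultA table languages preference).getD k 0)) (fun k => k)
      = PySem.List.min2? pvFIVE (fun k => -((pvScoresB table languages preference).getD k 0)) (fun k => k) := by
    rw [pvMin2_eq_fold (fun k => (pvResultA table languages preference).getD k 0) pvFIVE,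
      pvMin2_eq_fold (fun k => (pvScoresB table languages preference).getD k 0) pvFIVE]
    exact pvMin2Congr _ _ pvFIVE none
      (fun x hx => pvVal_eq table languages preference hpre x hx)
      (fun m hm => absurd hm (by simp))
  rw [hcongr]

theorem solution_spec : Claim_equal_solution := by
  intro table languages preference _ hpre
  exact pvMain table languages preference hpre
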